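-- pv_equiv track=rewrite | github.com/HyeseungNA/algorithm_prac | programmers/42578.py | solution
-- ===== SOURCE A (Python) =====
-- def solution(clothes):
--     answer = 1
--     dic = dict()
--     # 딕셔너리에 넣고
--     # 딕셔너리에 넣기
--     for c in clothes:
--         if c[1] not in dic:
--             dic[c[1]] = 1
--         else:
--             dic[c[1]] += 1
--
--     for value in dic.values():
--         answer *= (value + 1)
--
--     return answer - 1
-- ===== SOURCE B (Python) =====
-- def solution(clothes):
--     # sort-then-scan grouping: sort the category names, multiply over consecutive runs
--     cats = sorted(c[1] for c in clothes)
--     answer = 1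
--     i = 0
--     n = len(cats)
--     while i < n:
--         j = i
--         while j < n and cats[j] == cats[i]:
--             j += 1
--         answer *= (j - i + 1)
--         i = j
--     return answer - 1
-- ===== Notes on version B (the rewrite author's own statement) =====
-- stated objective: alternative
-- what changed: Replaces A's dictionary-counting loop and values pass with a sort-then-scan: B sorts the category names and multiplies the answer by (run length + 1) over each consecutive run of equal names, so the group sizes come from scanning runs of a sorted list instead of hash-table counters.
import Mathlib
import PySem

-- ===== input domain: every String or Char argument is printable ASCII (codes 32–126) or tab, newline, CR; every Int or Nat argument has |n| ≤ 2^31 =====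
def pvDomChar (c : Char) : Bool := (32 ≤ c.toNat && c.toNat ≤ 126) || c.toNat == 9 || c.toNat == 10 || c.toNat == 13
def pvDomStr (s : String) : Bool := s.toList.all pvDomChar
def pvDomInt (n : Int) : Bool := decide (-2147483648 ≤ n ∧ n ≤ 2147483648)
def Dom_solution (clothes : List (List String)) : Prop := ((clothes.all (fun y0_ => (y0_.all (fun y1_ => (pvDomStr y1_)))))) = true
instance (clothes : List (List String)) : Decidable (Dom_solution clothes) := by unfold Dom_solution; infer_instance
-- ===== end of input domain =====

-- B replaces A's dict-counting loop by sorting the category names and scanning consecutive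
-- runs with two pointers (alternative decomposition; same result, not claimed faster).

-- shared helper: c[1]; total via a default, exact on Pre_ (every inner list has length ≥ 2)
def catOf (c : List String) : String := (PySem.List.pyGet? c 1).getD ""

-- ===== PORT A =====
def solution (clothes : List (List String)) : Int :=
  (PySem.Dict.values
      (clothes.foldl (fun d c =>
        let k := catOf c
        if d.contains k = false then d.insert k 1
        else d.insert k (d.getD k 0 + 1)) PySem.Dict.empty)).foldl
    (fun a v => a * (v + 1)) 1 - 1

-- ===== PORT B =====
-- scan of the sorted category list: each run of equal keys (first element plus the
-- takeWhile-prefix of the tail) contributes a factor (run length + 1)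
def runProd : List String → Int
  | [] => 1
  | k :: rest =>
      (((rest.takeWhile (· == k)).length : Int) + 2) * runProd (rest.dropWhile (· == k))
termination_by l => l.length
decreasing_by
  exact Nat.lt_succ_of_le (List.length_dropWhile_le _ _)

def solution_alt (clothes : List (List String)) : Int :=
  runProd (PySem.List.sorted (clothes.map catOf) (fun x => x) false) - 1

-- ===== PRECONDITION & SPEC =====
-- A raises IndexError at c[1] when an inner list has fewer than two entries; exactly those inputs are excluded.
def Pre_solution (clothes : List (List String)) : Prop := ∀ c ∈ clothes, 2 ≤ c.length
instance (clothes : List (List String)) : Decidable (Pre_solution clothes) := by unfold Pre_solution; infer_instance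
def pvWitness_solution : List (List String) := [["a", "shirt"], ["b", "shirt"], ["c", "pants"]]

def Spec_solution (clothes : List (List String)) (out : Int) : Prop := out = solution_alt clothes
instance (clothes : List (List String)) (out : Int) : Decidable (Spec_solution clothes out) := by unfold Spec_solution; infer_instance

-- ===== CLAIM (what is proved, stated in full; the proofs are below) =====
def Claim_equal_solution : Prop := ∀ (clothes : List (List String)), Dom_solution clothes → Pre_solution clothes → Spec_solution clothes (solution clothes)

-- ===== LEMMAS AND PROOFS =====

-- the common value both programs compute: ∏ over the distinct categories of (count + 1)
def catProd (l : List String) : Int :=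
  ((PySem.Set.ofList l).map (fun k => (l.count k : Int) + 1)).prod

theorem foldl_mul_succ (l : List Int) (a : Int) :
    l.foldl (fun acc v => acc * (v + 1)) a = a * (l.map (· + 1)).prod := by
  induction l generalizing a with
  | nil => simp
  | cons x t ih => simp [List.foldl_cons, ih]; ring

theorem solution_eq_catProd (clothes : List (List String)) :
    solution clothes = catProd (clothes.map catOf) - 1 := by
  unfold solution
  have hfold : clothes.foldl (fun d c =>
      let k := catOf c
      if d.contains k = false then d.insert k 1
      else d.insert k (d.getD k 0 + 1)) PySem.Dict.empty
      = PySem.Dict.counter (clothes.map catOf) := by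
    rw [PySem.List.foldl_congr_mem clothes _
        (fun d c => d.insert (catOf c) (d.getD (catOf c) 0 + 1)) PySem.Dict.empty ?_]
    · rw [← List.foldl_map (f := catOf)
        (g := fun d k => PySem.Dict.insert d k (PySem.Dict.getD d k 0 + 1))]
      exact PySem.Dict.foldl_insert_getD_add_one_eq_counter _
    · intro d c _
      by_cases h : d.contains (catOf c) = false
      · simp [h, PySem.Dict.getD_of_not_contains d 0 h]
      · simp [h]
  rw [hfold]
  have hv : PySem.Dict.values (PySem.Dict.counter (clothes.map catOf))
      = (PySem.Set.ofList (clothes.map catOf)).map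
          (fun k => ((clothes.map catOf).count k : Int)) := by
    show (PySem.Dict.counter (clothes.map catOf)).items.map (·.2) = _
    rw [PySem.Dict.items_counter]
    simp [List.map_map, Function.comp]
  rw [hv, foldl_mul_succ]
  simp [catProd, List.map_map, Function.comp_def]

theorem catProd_perm {l₁ l₂ : List String} (h : l₁.Perm l₂) : catProd l₁ = catProd l₂ := by
  unfold catProd
  have hperm : (PySem.Set.ofList l₁).Perm (PySem.Set.ofList l₂) := by
    apply List.perm_of_nodup_nodup_toFinset_eq (PySem.Set.nodup_ofList l₁) (PySem.Set.nodup_ofList l₂)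
    ext k
    simp [List.mem_toFinset, PySem.Set.mem_ofList, h.mem_iff]
  have hmap : (PySem.Set.ofList l₂).map (fun k => (l₁.count k : Int) + 1)
      = (PySem.Set.ofList l₂).map (fun k => (l₂.count k : Int) + 1) := by
    apply List.map_congr_left
    intro k _
    rw [h.count_eq]
  calc ((PySem.Set.ofList l₁).map (fun k => (l₁.count k : Int) + 1)).prod
      = ((PySem.Set.ofList l₂).map (fun k => (l₁.count k : Int) + 1)).prod :=
        (hperm.map _).prod_eq
    _ = _ := by rw [hmap]

theorem update_cons_of_not_mem (t : List String) (s : PySem.Set String) (a : String)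
    (h : a ∉ t) : PySem.Set.update (a :: s) t = a :: PySem.Set.update s t := by
  induction t generalizing s with
  | nil => rfl
  | cons x xs ih =>
    have hxa : (x == a) = false := by
      simp only [beq_eq_false_iff_ne, ne_eq]
      exact fun he => h (he ▸ List.mem_cons_self)
    have hxne : x ≠ a := beq_eq_false_iff_ne.mp hxa
    have hadd : PySem.Set.add (a :: s) x = a :: PySem.Set.add s x := by
      by_cases hm : x ∈ s <;>
        simp [PySem.Set.add, PySem.Set.contains, hm, hxne]
    simp only [PySem.Set.update, List.foldl_cons, hadd]
    exact ih _ (fun hm => h (List.mem_cons_of_mem _ hm))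

theorem update_const (run : List String) (s : PySem.Set String) (k : String)
    (hk : k ∈ s) (hall : ∀ x ∈ run, x = k) : PySem.Set.update s run = s := by
  induction run with
  | nil => rfl
  | cons x xs ih =>
    have hx : x = k := hall x List.mem_cons_self
    have hadd : PySem.Set.add s x = s := by
      subst hx
      simp [PySem.Set.add, PySem.Set.contains, hk]
    simp only [PySem.Set.update, List.foldl_cons, hadd]
    exact ih (fun y hy => hall y (List.mem_cons_of_mem _ hy))

theorem not_mem_dropWhile_of_sorted (k : String) (rest : List String)
    (hle : ∀ x ∈ rest, k ≤ x) (hsort : rest.Pairwise (· ≤ ·)) :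
    k ∉ rest.dropWhile (· == k) := by
  induction rest with
  | nil => simp
  | cons x t ih =>
    have hle' : ∀ y ∈ t, k ≤ y := fun y hy => hle y (List.mem_cons_of_mem _ hy)
    by_cases hx : (x == k) = true
    · rw [List.dropWhile_cons, if_pos hx]
      exact ih hle' (List.pairwise_cons.mp hsort).2
    · rw [List.dropWhile_cons, if_neg hx]
      have hxk : x ≠ k := fun he => hx (by simp [he])
      have hkx : k < x := lt_of_le_of_ne (hle x List.mem_cons_self) (Ne.symm hxk)
      intro hk
      rcases List.mem_cons.mp hk with he | hk'
      · exact hxk he.symm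
      · have : x ≤ k := (List.pairwise_cons.mp hsort).1 k hk'
        exact absurd (lt_of_lt_of_le hkx this) (lt_irrefl k)

-- the distinct categories of a grouped list  k :: (run of k's) ++ rest'  with  k ∉ rest'
theorem catProd_cons_grouped (k : String) (run rest' : List String)
    (hallrun : ∀ x ∈ run, x = k) (hknot : k ∉ rest') :
    catProd (k :: (run ++ rest')) = ((run.length : Int) + 2) * catProd rest' := by
  have hofList : PySem.Set.ofList (k :: (run ++ rest')) = k :: PySem.Set.ofList rest' := by
    have h0 : PySem.Set.ofList (k :: (run ++ rest')) = PySem.Set.update [k] (run ++ rest') := rfl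
    rw [h0]
    have h1 : PySem.Set.update ([k] : PySem.Set String) (run ++ rest')
        = PySem.Set.update (PySem.Set.update [k] run) rest' := by
      simp [PySem.Set.update, List.foldl_append]
    rw [h1, update_const run [k] k List.mem_cons_self hallrun]
    exact update_cons_of_not_mem rest' [] k hknot
  have hcount_k : (((k :: (run ++ rest')).count k : Int)) = (run.length : Int) + 1 := by
    have hrunc : run.count k = run.length :=
      List.count_eq_length.mpr (fun x hx => by rw [hallrun x hx])
    have hr'c : rest'.count k = 0 := List.count_eq_zero.mpr hknot
    simp [List.count_append, hrunc, hr'c]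
  have hcount_other : ∀ j ∈ PySem.Set.ofList rest',
      (((k :: (run ++ rest')).count j : Int)) = (rest'.count j : Int) := by
    intro j hj
    have hjmem : j ∈ rest' := (PySem.Set.mem_ofList rest' j).mp hj
    have hjk : j ≠ k := fun he => hknot (he ▸ hjmem)
    have hrunc : run.count j = 0 :=
      List.count_eq_zero.mpr (fun hjr => hjk (hallrun j hjr))
    simp [List.count_append, hrunc, Ne.symm hjk]
  unfold catProd
  rw [hofList]
  simp only [List.map_cons, List.prod_cons, hcount_k]
  have hmap : (PySem.Set.ofList rest').map (fun j => (((k :: (run ++ rest')).count j : Int) + 1))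
      = (PySem.Set.ofList rest').map (fun j => ((rest'.count j : Int) + 1)) := by
    apply List.map_congr_left
    intro j hj
    rw [hcount_other j hj]
  rw [hmap]
  ring

-- on a nondecreasing list the run scan computes catProd
theorem runProd_eq_catProd : ∀ (n : Nat) (s : List String), s.length ≤ n →
    s.Pairwise (· ≤ ·) → runProd s = catProd s := by
  intro n
  induction n with
  | zero =>
    intro s hlen _
    have hs : s = [] := List.eq_nil_of_length_eq_zero (Nat.le_zero.mp hlen)
    subst hs
    rw [runProd]; rfl
  | succ m ih =>
    intro s hlen hsort
    match s, hlen, hsort with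
    | [], _, _ => rw [runProd]; rfl
    | k :: rest, hlen, hsort =>
      have hle : ∀ x ∈ rest, k ≤ x := fun x hx => (List.pairwise_cons.mp hsort).1 x hx
      have hrest : rest.Pairwise (· ≤ ·) := (List.pairwise_cons.mp hsort).2
      have hsplit : rest.takeWhile (· == k) ++ rest.dropWhile (· == k) = rest :=
        List.takeWhile_append_dropWhile
      have hallrun : ∀ x ∈ rest.takeWhile (· == k), x = k :=
        fun x hx => eq_of_beq (List.mem_takeWhile_imp (p := fun y => y == k) hx)
      have hknot : k ∉ rest.dropWhile (· == k) := not_mem_dropWhile_of_sorted k rest hle hrest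
      have hsorted' : (rest.dropWhile (· == k)).Pairwise (· ≤ ·) :=
        hrest.sublist (List.dropWhile_sublist _)
      have hlen' : (rest.dropWhile (· == k)).length ≤ m := by
        have h1 := List.length_dropWhile_le (fun x => x == k) rest
        simp only [List.length_cons] at hlen
        omega
      rw [runProd, ih _ hlen' hsorted']
      calc (((rest.takeWhile (· == k)).length : Int) + 2) * catProd (rest.dropWhile (· == k))
          = catProd (k :: (rest.takeWhile (· == k) ++ rest.dropWhile (· == k))) :=
            (catProd_cons_grouped k _ _ hallrun hknot).symm
        _ = catProd (k :: rest) := by rw [hsplit]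

theorem solution_alt_eq_catProd (clothes : List (List String)) :
    solution_alt clothes = catProd (clothes.map catOf) - 1 := by
  unfold solution_alt
  have hs := PySem.List.sorted_pairwise (clothes.map catOf) (fun x => x)
  have hp := PySem.List.sorted_perm (clothes.map catOf) (fun x => x) false
  rw [runProd_eq_catProd (PySem.List.sorted (clothes.map catOf) (fun x => x) false).length _
      le_rfl hs, catProd_perm hp]

-- ===== VERDICT (by name: the statement is the Claim_ definition above) =====
theorem solution_spec : Claim_equal_solution := by
  intro clothes _ _
  unfold Spec_solution
  rw [solution_eq_catProd, solution_alt_eq_catProd]
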